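-- pv_equiv track=rewrite | github.com/Afzhal-ahmed-s/Python-DSA | Experiment/NitinC_Ass/Seven.py | intersection_with_duplicates
-- ===== SOURCE A (Python) =====
-- def intersection_with_duplicates(arr1, arr2):
--     arr1.sort()
--     arr2.sort()
--
--     intersection = []
--     i, j = 0, 0
--
--     while i < len(arr1) and j < len(arr2):
--
--         if arr1[i] == arr2[j]:
--             intersection.append(arr1[i])
--             i += 1
--             j += 1
--         elif arr1[i] < arr2[j]:
--             i += 1
--         else:
--             j += 1
--
--     return intersection
-- ===== SOURCE B (Python) =====
-- def intersection_with_duplicates(arr1, arr2):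
--     arr1.sort()
--     arr2.sort()
--
--     c1 = {}
--     for x in arr1:
--         c1[x] = c1.get(x, 0) + 1
--     c2 = {}
--     for y in arr2:
--         c2[y] = c2.get(y, 0) + 1
--
--     out = []
--     for v in sorted(c1):
--         out += [v] * min(c1[v], c2.get(v, 0))
--     return out
-- ===== Notes on version B (the rewrite author's own statement) =====
-- stated objective: alternative
-- what changed: Replaces the two-pointer index merge with frequency tables: count occurrences of each value in both sorted arrays, then emit each distinct value of arr1 in sorted order min(c1[v], c2[v]) times.
import Mathlib
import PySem

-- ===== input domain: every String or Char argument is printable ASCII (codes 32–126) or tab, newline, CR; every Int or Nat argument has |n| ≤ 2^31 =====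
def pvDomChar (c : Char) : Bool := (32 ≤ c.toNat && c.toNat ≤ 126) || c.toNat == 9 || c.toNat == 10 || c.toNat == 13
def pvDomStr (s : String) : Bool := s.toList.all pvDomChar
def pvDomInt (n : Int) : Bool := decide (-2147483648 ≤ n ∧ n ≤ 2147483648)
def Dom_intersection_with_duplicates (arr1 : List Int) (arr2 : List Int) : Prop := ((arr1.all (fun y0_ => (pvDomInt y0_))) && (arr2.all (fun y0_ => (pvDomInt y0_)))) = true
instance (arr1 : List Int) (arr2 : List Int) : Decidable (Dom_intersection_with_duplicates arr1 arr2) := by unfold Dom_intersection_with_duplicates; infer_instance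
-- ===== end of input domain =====

-- B replaces A's two-pointer merge by frequency tables: count each value in both sorted arrays,
-- then emit each distinct value in sorted order min(c1[v], c2[v]) times (objective: alternative).
-- Both Pythons sort their arguments in place; the equivalence proved here is about the return value.

-- ===== PORT A =====
-- the while loop over indices i, j, as structural recursion on the two suffixes arr1[i:], arr2[j:]
def pvMergeA : List Int → List Int → List Int
  | [], _ => []
  | _ :: _, [] => []
  | x :: xs, y :: ys =>
      if x = y then x :: pvMergeA xs ys
      else if x < y then pvMergeA xs (y :: ys)
      else pvMergeA (x :: xs) ys
termination_by xs ys => xs.length + ys.length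

def intersection_with_duplicates (arr1 : List Int) (arr2 : List Int) : List Int :=
  pvMergeA (PySem.List.sorted arr1 (fun x => x) false) (PySem.List.sorted arr2 (fun x => x) false)

-- ===== PORT B =====
-- the counting loop 'for x in arr: c[x] = c.get(x, 0) + 1'
def pvCounterB (xs : List Int) : PySem.Dict Int Int :=
  xs.foldl (fun d x => d.insert x (d.getD x 0 + 1)) PySem.Dict.empty

-- the output loop 'for v in sorted(c1): out += [v] * min(c1[v], c2.get(v, 0))'
def intersection_with_duplicates_alt (arr1 : List Int) (arr2 : List Int) : List Int :=
  let a1 := PySem.List.sorted arr1 (fun x => x) false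
  let a2 := PySem.List.sorted arr2 (fun x => x) false
  let c1 := pvCounterB a1
  let c2 := pvCounterB a2
  (PySem.List.sorted c1.keys (fun v => v) false).foldl
    (fun out v => out ++ List.replicate (min (c1.getD v 0) (c2.getD v 0)).toNat v) []

-- ===== PRECONDITION & SPEC =====
def Spec_intersection_with_duplicates (arr1 : List Int) (arr2 : List Int) (out : List Int) : Prop := out = intersection_with_duplicates_alt arr1 arr2
instance (arr1 : List Int) (arr2 : List Int) (out : List Int) : Decidable (Spec_intersection_with_duplicates arr1 arr2 out) := by unfold Spec_intersection_with_duplicates; infer_instance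

-- ===== CLAIM (what is proved, stated in full; the proofs are below) =====
def Claim_equal_intersection_with_duplicates : Prop := ∀ (arr1 : List Int) (arr2 : List Int), Dom_intersection_with_duplicates arr1 arr2 → Spec_intersection_with_duplicates arr1 arr2 (intersection_with_duplicates arr1 arr2)

-- ===== LEMMAS AND PROOFS =====

-- A's output is a sublist of its first (sorted) argument, hence sorted
theorem pvMergeA_sublist (xs ys : List Int) : (pvMergeA xs ys).Sublist xs := by
  induction xs, ys using pvMergeA.induct with
  | case1 ys => simp [pvMergeA]
  | case2 x xs => simp [pvMergeA]
  | case3 xs y ys ih => simpa [pvMergeA] using ih.cons₂ y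
  | case4 x xs y ys hne hlt ih => simpa [pvMergeA, hne, hlt] using ih.cons _
  | case5 x xs y ys hne hge ih => simpa [pvMergeA, hne, hge] using ih

-- on sorted inputs, A's output has count min(count in xs, count in ys) for every value
theorem pvMergeA_count (xs ys : List Int)
    (hxs : xs.Pairwise (· ≤ ·)) (hys : ys.Pairwise (· ≤ ·)) (w : Int) :
    (pvMergeA xs ys).count w = min (xs.count w) (ys.count w) := by
  induction xs, ys using pvMergeA.induct with
  | case1 ys => simp [pvMergeA]
  | case2 x xs => simp [pvMergeA]
  | case3 xs y ys ih =>
    rw [List.pairwise_cons] at hxs hys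
    have hrec := ih hxs.2 hys.2
    rw [show pvMergeA (y :: xs) (y :: ys) = y :: pvMergeA xs ys from by simp [pvMergeA]]
    by_cases hw : w = y
    · subst hw; simp [List.count_cons_self, hrec]
    · simp [List.count_cons_of_ne (Ne.symm hw), hrec]
  | case4 x xs y ys hne hlt ih =>
    rw [List.pairwise_cons] at hxs
    have hxy : x ∉ (y :: ys) := by
      intro hm
      rcases List.mem_cons.mp hm with h | h
      · exact hne h
      · rw [List.pairwise_cons] at hys; have := hys.1 x h; omega
    have hcy : (y :: ys).count x = 0 := List.count_eq_zero.mpr hxy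
    rw [show pvMergeA (x :: xs) (y :: ys) = pvMergeA xs (y :: ys) by
      simp [pvMergeA, hne, hlt]]
    rw [ih hxs.2 hys]
    by_cases hw : w = x
    · subst hw; rw [List.count_cons_self, hcy]; omega
    · rw [List.count_cons_of_ne (Ne.symm hw)]
  | case5 x xs y ys hne hge ih =>
    rw [List.pairwise_cons] at hys
    have hyx : y ∉ (x :: xs) := by
      intro hm
      rcases List.mem_cons.mp hm with h | h
      · exact hne h.symm
      · rw [List.pairwise_cons] at hxs; have := hxs.1 y h; omega
    have hcx : (x :: xs).count y = 0 := List.count_eq_zero.mpr hyx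
    rw [show pvMergeA (x :: xs) (y :: ys) = pvMergeA (x :: xs) ys by
      simp [pvMergeA, hne, hge]]
    rw [ih hxs hys.2]
    by_cases hw : w = y
    · subst hw; rw [List.count_cons_self, hcx]; omega
    · rw [List.count_cons_of_ne (Ne.symm hw)]

-- counting occurrences in a flatMap of per-key replicates over distinct keys
theorem count_flatMap_replicate (ks : List Int) (m : Int → Nat) (hnd : ks.Nodup) (w : Int) :
    (ks.flatMap (fun v => List.replicate (m v) v)).count w
      = if w ∈ ks then m w else 0 := by
  induction ks with
  | nil => simp
  | cons k ks ih =>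
    rw [List.nodup_cons] at hnd
    by_cases hw : w = k
    · subst hw
      simp [List.flatMap_cons, ih hnd.2, hnd.1]
    · simp [List.flatMap_cons, ih hnd.2, List.count_replicate, hw, Ne.symm hw]

-- a flatMap of replicates over an increasing key list is sorted
theorem pairwise_flatMap_replicate (ks : List Int) (m : Int → Nat)
    (hks : ks.Pairwise (· ≤ ·)) :
    (ks.flatMap (fun v => List.replicate (m v) v)).Pairwise (· ≤ ·) := by
  induction ks with
  | nil => simp
  | cons k ks ih =>
    rw [List.pairwise_cons] at hks
    simp only [List.flatMap_cons]
    refine List.pairwise_append.mpr ⟨List.pairwise_replicate.mpr (.inr le_rfl), ih hks.2, ?_⟩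
    intro a ha b hb
    have ha' := List.eq_of_mem_replicate ha
    obtain ⟨u, hu, hbu⟩ := List.mem_flatMap.mp hb
    have hb' := List.eq_of_mem_replicate hbu
    rw [ha', hb']
    exact hks.1 u hu

theorem toNat_min_cast (a b : Nat) : (min (a : Int) (b : Int)).toNat = min a b := by omega

-- B's output equals the flatMap of replicates over the sorted distinct values of xs
theorem altB_eq_flatMap (arr1 arr2 : List Int) :
    intersection_with_duplicates_alt arr1 arr2
      = (PySem.List.sorted (PySem.Set.ofList (PySem.List.sorted arr1 (fun x => x) false)) (fun v => v) false).flatMap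
          (fun v => List.replicate
            (min ((PySem.List.sorted arr1 (fun x => x) false).count v)
                 ((PySem.List.sorted arr2 (fun x => x) false).count v)) v) := by
  unfold intersection_with_duplicates_alt
  have hc : pvCounterB = PySem.Dict.counter := by
    funext xs
    exact PySem.Dict.foldl_insert_getD_add_one_eq_counter xs
  rw [hc]
  simp only [PySem.Dict.keys_counter, PySem.Dict.getD_counter,
    PySem.List.foldl_append_eq_flatMap, List.nil_append, toNat_min_cast]

-- ===== VERDICT (by name: the statement is the Claim_ definition above) =====
theorem intersection_with_duplicates_spec : Claim_equal_intersection_with_duplicates := by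
  intro arr1 arr2 _
  unfold Spec_intersection_with_duplicates intersection_with_duplicates
  rw [altB_eq_flatMap]
  set xs := PySem.List.sorted arr1 (fun x => x) false with hxsdef
  set ys := PySem.List.sorted arr2 (fun x => x) false with hysdef
  have hxs : xs.Pairwise (· ≤ ·) := by
    simpa using PySem.List.sorted_pairwise arr1 (fun x => x)
  have hys : ys.Pairwise (· ≤ ·) := by
    simpa using PySem.List.sorted_pairwise arr2 (fun x => x)
  set sk := PySem.List.sorted (PySem.Set.ofList xs) (fun v => v) false with hskdef
  have hsklt : sk.Pairwise (· < ·) := by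
    simpa [hskdef] using PySem.List.sorted_ofList_pairwise_lt (xs := xs)
  have hsknd : sk.Nodup := hsklt.imp (fun h => ne_of_lt h)
  have hskle : sk.Pairwise (· ≤ ·) := hsklt.imp (fun h => le_of_lt h)
  have hmem : ∀ w : Int, w ∈ sk ↔ w ∈ xs := by
    intro w
    rw [hskdef, PySem.List.mem_sorted, PySem.Set.mem_ofList]
  have hperm : (pvMergeA xs ys).Perm
      (sk.flatMap (fun v => List.replicate (min (xs.count v) (ys.count v)) v)) := by
    rw [List.perm_iff_count]
    intro w
    rw [pvMergeA_count xs ys hxs hys w,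
        count_flatMap_replicate sk (fun v => min (xs.count v) (ys.count v)) hsknd w]
    by_cases hw : w ∈ sk
    · simp [hw]
    · have : xs.count w = 0 := List.count_eq_zero.mpr (fun h => hw ((hmem w).mpr h))
      simp [hw, this]
  exact hperm.eq_of_pairwise (fun a b _ _ h1 h2 => le_antisymm h1 h2)
    (List.Pairwise.sublist (pvMergeA_sublist xs ys) hxs)
    (pairwise_flatMap_replicate sk _ hskle)
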